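-- pv_equiv track=rewrite | github.com/Krivoy05/PytonForEverbody | 6 strings/additional exercises/ex16.py | find_alphanumerical
-- ===== SOURCE A (Python) =====
-- def find_alphanumerical(input_string):
--     result = []
--     word_until_whitespace = ''
--     position_counter = 1
--     for symbol in input_string:
--         if symbol ==' ' or position_counter == len(input_string):
--             word_until_whitespace += symbol
--             contains_alpha = False
--             contains_digit = False
--             for sub_symvol in word_until_whitespace:
--                 if sub_symvol.isalpha():
--                     contains_alpha = True
--                 if sub_symvol.isdigit():
--                     contains_digit = True
--                 if contains_digit and contains_alpha:
--                     result.append(word_until_whitespace.strip())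
--                     contains_alpha = False
--                     contains_digit = False
--                     break
--             word_until_whitespace = ''
--         else:
--             word_until_whitespace += symbol
--         position_counter += 1
--     return result
-- ===== SOURCE B (Python) =====
-- def find_alphanumerical(input_string):
--     result = []
--     for token in input_string.split(' '):
--         if any(c.isalpha() for c in token) and any(c.isdigit() for c in token):
--             result.append(token.strip())
--     return result
-- ===== Notes on version B (the rewrite author's own statement) =====
-- stated objective: simpler
-- what changed: A's interleaved character-by-character state machine (manual word accumulator, position counter, inner flag/break scan) is replaced by a tokenize-first decomposition: split on the space character, then filter tokens containing both a letter and a digit and strip them.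
import Mathlib
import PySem

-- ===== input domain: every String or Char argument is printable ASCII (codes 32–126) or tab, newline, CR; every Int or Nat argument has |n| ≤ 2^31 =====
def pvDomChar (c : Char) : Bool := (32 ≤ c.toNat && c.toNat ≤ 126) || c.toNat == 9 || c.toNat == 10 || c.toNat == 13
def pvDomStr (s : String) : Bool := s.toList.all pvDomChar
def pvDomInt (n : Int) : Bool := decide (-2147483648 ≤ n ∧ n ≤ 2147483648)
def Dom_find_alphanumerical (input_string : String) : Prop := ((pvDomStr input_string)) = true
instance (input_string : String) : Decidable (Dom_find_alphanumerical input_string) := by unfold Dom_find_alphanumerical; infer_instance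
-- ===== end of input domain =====

-- B replaces A's character-by-character state machine with a split-on-space /
-- filter / strip decomposition; objective: simpler (same O(n) cost).

-- ===== PORT A =====
-- inner 'for sub_symvol in word_until_whitespace' loop with its break
def pvCheckWord (cs : List Char) (w : List Char) (ca cd : Bool) (r : List String) : List String :=
  match cs with
  | [] => r
  | c :: rest =>
    let ca' := if PySem.Chars.isalpha c then true else ca
    let cd' := if PySem.Chars.isdigit c then true else cd
    if cd' && ca' then r ++ [String.ofList (PySem.Chars.strip w)]
    else pvCheckWord rest w ca' cd' r

-- outer 'for symbol in input_string' loop; state = (result, word_until_whitespace, position_counter)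
def pvLoopA (n : Int) (cs : List Char) (w : List Char) (pos : Int) (r : List String) : List String :=
  match cs with
  | [] => r
  | c :: rest =>
    if c = ' ' ∨ pos = n then
      pvLoopA n rest [] (pos + 1) (pvCheckWord (w ++ [c]) (w ++ [c]) false false r)
    else
      pvLoopA n rest (w ++ [c]) (pos + 1) r

def find_alphanumerical (input_string : String) : List String :=
  pvLoopA (input_string.toList.length : Int) input_string.toList [] 1 []

-- ===== PORT B =====
def find_alphanumerical_alt (input_string : String) : List String :=
  (PySem.Chars.splitOn input_string.toList [' ']).foldl
    (fun result token =>
      if token.any PySem.Chars.isalpha && token.any PySem.Chars.isdigit then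
        result ++ [String.ofList (PySem.Chars.strip token)]
      else result)
    []

-- ===== PRECONDITION & SPEC =====
def Spec_find_alphanumerical (input_string : String) (out : List String) : Prop := out = find_alphanumerical_alt input_string
instance (input_string : String) (out : List String) : Decidable (Spec_find_alphanumerical input_string out) := by unfold Spec_find_alphanumerical; infer_instance

-- ===== CLAIM (what is proved, stated in full; the proofs are below) =====
def Claim_equal_find_alphanumerical : Prop := ∀ (input_string : String), Dom_find_alphanumerical input_string → Spec_find_alphanumerical input_string (find_alphanumerical input_string)

-- ===== LEMMAS AND PROOFS =====

-- proof-side vocabulary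
def pvOk (t : List Char) : Bool := t.any PySem.Chars.isalpha && t.any PySem.Chars.isdigit

def pvProc (ts : List (List Char)) : List String :=
  (ts.filter pvOk).map (fun t => String.ofList (PySem.Chars.strip t))

-- reference split-on-space
def pvSplitSp : List Char → List (List Char)
  | [] => [[]]
  | c :: cs => if c = ' ' then [] :: pvSplitSp cs else (pvSplitSp cs).modifyHead (c :: ·)

lemma pvSplitSp_ne_nil (cs : List Char) : pvSplitSp cs ≠ [] := by
  cases cs with
  | nil => simp [pvSplitSp]
  | cons c rest =>
    obtain ⟨a, t, h⟩ := List.exists_cons_of_ne_nil (pvSplitSp_ne_nil rest)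
    simp only [pvSplitSp, h]
    split <;> simp [List.modifyHead_cons]

lemma pvCheckWord_eq (cs : List Char) (w : List Char) (ca cd : Bool) (r : List String)
    (h : (cd && ca) = false) :
    pvCheckWord cs w ca cd r =
      if (ca || cs.any PySem.Chars.isalpha) && (cd || cs.any PySem.Chars.isdigit)
      then r ++ [String.ofList (PySem.Chars.strip w)] else r := by
  induction cs generalizing ca cd with
  | nil => revert h; cases ca <;> cases cd <;> simp [pvCheckWord]
  | cons c rest ih =>
    cases ha : PySem.Chars.isalpha c <;> cases hd : PySem.Chars.isdigit c <;>
      cases ca <;> cases cd <;> simp only [pvCheckWord, ha, hd, List.any_cons] <;> simp_all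

lemma pvOk_append_space (w : List Char) : pvOk (w ++ [' ']) = pvOk w := by
  simp [pvOk, List.any_append, show PySem.Chars.isalpha ' ' = false from rfl,
    show PySem.Chars.isdigit ' ' = false from rfl]

lemma pvRstrip_append_space (w : List Char) :
    PySem.Chars.rstrip (w ++ [' ']) = PySem.Chars.rstrip w := by
  simp [PySem.Chars.rstrip, show PySem.Chars.isspace ' ' = true from rfl]

lemma pvStrip_append_space (w : List Char) :
    PySem.Chars.strip (w ++ [' ']) = PySem.Chars.strip w := by
  simp only [PySem.Chars.strip]
  by_cases h : PySem.Chars.lstrip w = []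
  · have hall : ∀ c ∈ w, PySem.Chars.isspace c = true := by
      intro c hc
      by_contra hns
      have := List.dropWhile_eq_nil_iff.mp (h : List.dropWhile PySem.Chars.isspace w = [])
      exact hns (this c hc)
    have h2 : PySem.Chars.lstrip (w ++ [' ']) = [] := by
      unfold PySem.Chars.lstrip
      rw [List.dropWhile_eq_nil_iff]
      intro c hc
      rcases List.mem_append.mp hc with h' | h'
      · exact hall c h'
      · simp at h'; subst h'; rfl
    rw [h, h2]
  · have hne : (List.dropWhile PySem.Chars.isspace w).isEmpty = false := by
      cases hx : List.dropWhile PySem.Chars.isspace w with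
      | nil => exact absurd hx h
      | cons a l => rfl
    have h2 : PySem.Chars.lstrip (w ++ [' ']) = PySem.Chars.lstrip w ++ [' '] := by
      unfold PySem.Chars.lstrip
      rw [List.dropWhile_append, hne]
      simp
    rw [h2, pvRstrip_append_space]

lemma pvProc_cons (h : List Char) (t : List (List Char)) :
    pvProc (h :: t) =
      (if pvOk h then [String.ofList (PySem.Chars.strip h)] else []) ++ pvProc t := by
  simp only [pvProc, List.filter_cons]
  split <;> simp

-- the flush step: what A appends for one completed word ending in the delimiter
lemma pvFlush_eq (w : List Char) (r : List String) :
    pvCheckWord (w ++ [' ']) (w ++ [' ']) false false r =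
      (if pvOk w then r ++ [String.ofList (PySem.Chars.strip w)] else r) := by
  rw [pvCheckWord_eq _ _ _ _ _ rfl]
  have hok : ((false || (w ++ [' ']).any PySem.Chars.isalpha) &&
      (false || (w ++ [' ']).any PySem.Chars.isdigit)) = pvOk w := by
    have := pvOk_append_space w
    simpa [pvOk] using this
  rw [hok, pvStrip_append_space]

lemma pvLoopA_eq (cs : List Char) (w : List Char) (pos n : Int) (r : List String)
    (hpos : pos + cs.length = n + 1) (hw : ' ' ∉ w) (hcs : cs ≠ []) :
    pvLoopA n cs w pos r = r ++ pvProc ((pvSplitSp cs).modifyHead (w ++ ·)) := by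
  induction cs generalizing w pos r with
  | nil => exact absurd rfl hcs
  | cons c rest ih =>
    by_cases hr : rest = []
    · subst hr
      have hpn : pos = n := by simp at hpos; omega
      simp only [pvLoopA]
      rw [if_pos (Or.inr hpn)]
      by_cases hc : c = ' '
      · subst hc
        rw [pvFlush_eq]
        have hs : pvSplitSp [' '] = [[], []] := rfl
        rw [hs, List.modifyHead_cons, List.append_nil, pvProc_cons]
        have hnil : pvProc [[]] = [] := rfl
        rw [hnil]
        split <;> simp
      · rw [pvCheckWord_eq _ _ _ _ _ rfl]
        have hs : pvSplitSp [c] = [[c]] := by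
          simp [pvSplitSp, hc, List.modifyHead_cons]
        rw [hs, List.modifyHead_cons, pvProc_cons]
        have hnil : pvProc [] = [] := rfl
        rw [hnil]
        simp only [pvOk, Bool.false_or, List.append_nil]
        split <;> simp
    · have hpn : ¬ pos = n := by
        have h1 : 1 ≤ rest.length := List.length_pos_iff.mpr hr
        simp only [List.length_cons] at hpos
        push_cast at hpos
        omega
      by_cases hc : c = ' '
      · subst hc
        simp only [pvLoopA, true_or, if_true]
        rw [ih [] (pos + 1) _ (by simp only [List.length_cons] at hpos ⊢; push_cast at hpos ⊢; omega) (by simp) hr]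
        rw [pvFlush_eq]
        have hs : pvSplitSp (' ' :: rest) = [] :: pvSplitSp rest := by
          simp [pvSplitSp]
        rw [hs, List.modifyHead_cons, List.append_nil, pvProc_cons]
        obtain ⟨h0, t0, hsplit⟩ := List.exists_cons_of_ne_nil (pvSplitSp_ne_nil rest)
        rw [hsplit, List.modifyHead_cons]
        simp only [List.nil_append, ← hsplit]
        split <;> simp
      · have hcond : ¬ (c = ' ' ∨ pos = n) := by tauto
        simp only [pvLoopA]
        rw [if_neg hcond]
        rw [ih (w ++ [c]) (pos + 1) r
          (by simp only [List.length_cons] at hpos ⊢; push_cast at hpos ⊢; omega)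
          (by intro hmem; rcases List.mem_append.mp hmem with h' | h'
              · exact hw h'
              · simp at h'; exact hc h'.symm) hr]
        simp only [pvSplitSp, if_neg hc]
        obtain ⟨h0, t0, hsplit⟩ := List.exists_cons_of_ne_nil (pvSplitSp_ne_nil rest)
        rw [hsplit, List.modifyHead_cons, List.modifyHead_cons, List.modifyHead_cons]
        simp

-- relate PySem's split to the reference split
lemma pvGo_spec (l : List Char) : ∀ (fuel : Nat), l.length ≤ fuel →
    ∀ (cur : List Char) (acc : List (List Char)),
    PySem.Chars.splitOn.go [' '] fuel l cur acc =
      acc.reverse ++ (pvSplitSp l).modifyHead (cur.reverse ++ ·) := by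
  induction l with
  | nil =>
    intro fuel _ cur acc
    cases fuel <;> simp [PySem.Chars.splitOn.go, pvSplitSp, List.modifyHead]
  | cons c rest ih =>
    intro fuel hlen cur acc
    cases fuel with
    | zero => simp at hlen
    | succ f =>
      have hlen' : rest.length ≤ f := by simpa using hlen
      by_cases hc : c = ' '
      · subst hc
        have hpre : [' '].isPrefixOf (' ' :: rest) = true := by
          simp [List.isPrefixOf]
        simp only [PySem.Chars.splitOn.go, hpre, if_true]
        simp only [List.length_cons, List.length_nil, List.drop_succ_cons, List.drop_zero]
        rw [ih f hlen' [] (cur.reverse :: acc)]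
        have hs : pvSplitSp (' ' :: rest) = [] :: pvSplitSp rest := by
          simp [pvSplitSp]
        rw [hs, List.modifyHead_cons]
        obtain ⟨h0, t0, hsplit⟩ := List.exists_cons_of_ne_nil (pvSplitSp_ne_nil rest)
        rw [hsplit, List.modifyHead_cons]
        simp
      · have hpre : [' '].isPrefixOf (c :: rest) = false := by
          simp [List.isPrefixOf]
          exact fun h => hc h.symm
        simp only [PySem.Chars.splitOn.go, hpre, Bool.false_eq_true, if_false]
        rw [ih f hlen' (c :: cur) acc]
        simp only [pvSplitSp, if_neg hc]
        obtain ⟨h0, t0, hsplit⟩ := List.exists_cons_of_ne_nil (pvSplitSp_ne_nil rest)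
        rw [hsplit, List.modifyHead_cons, List.modifyHead_cons, List.modifyHead_cons]
        simp

lemma pvSplitOn_eq (l : List Char) : PySem.Chars.splitOn l [' '] = pvSplitSp l := by
  unfold PySem.Chars.splitOn
  rw [pvGo_spec l (l.length + 1) (by omega) [] []]
  obtain ⟨h0, t0, hsplit⟩ := List.exists_cons_of_ne_nil (pvSplitSp_ne_nil l)
  rw [hsplit, List.modifyHead_cons]
  simp

lemma pvAlt_eq (s : String) : find_alphanumerical_alt s = pvProc (pvSplitSp s.toList) := by
  unfold find_alphanumerical_alt
  rw [pvSplitOn_eq]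
  show (pvSplitSp s.toList).foldl
    (fun result token => if pvOk token then result ++ [String.ofList (PySem.Chars.strip token)] else result) [] = _
  rw [PySem.List.foldl_append_if (p := pvOk) (f := fun t => String.ofList (PySem.Chars.strip t))]
  simp [pvProc]

-- ===== VERDICT (by name: the statement is the Claim_ definition above) =====
theorem find_alphanumerical_spec : Claim_equal_find_alphanumerical := by
  intro s _
  unfold Spec_find_alphanumerical
  rw [pvAlt_eq]
  unfold find_alphanumerical
  cases h : s.toList with
  | nil => simp [pvLoopA, pvSplitSp, pvProc, pvOk]
  | cons c rest =>
    rw [pvLoopA_eq (c :: rest) [] 1 _ [] (by omega) (by simp) (by simp)]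
    obtain ⟨h0, t0, hsplit⟩ := List.exists_cons_of_ne_nil (pvSplitSp_ne_nil (c :: rest))
    rw [hsplit, List.modifyHead_cons]
    simp
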